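-- pv_equiv track=rewrite | github.com/l-michalik/TOMOJLIFEPROJECT | utils/task_request_parser.py | extract_operation_type
-- ===== SOURCE A (Python) =====
-- from typing import Any
--
-- OPERATION_KEYWORDS = {
--     "rollback": ("rollback", "roll back"),
--     "deploy": ("deploy", "rollout"),
--     "restart": ("restart", "redeploy"),
--     "scale": ("scale", "scal"),
--     "configure": ("configure", "configuration", "config", "update config"),
--     "diagnose": ("diagnose", "debug", "investigate", "troubleshoot", "check"),
--     "pipeline": ("pipeline", "workflow", "ci/cd", "cicd"),
--     "build": ("build",),
--     "test": ("test", "tests"),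
--     "release": ("release",),
-- }
--
-- OPERATION_ALIASES = {
--     "deploy": "deploy",
--     "deployment": "deploy",
--     "rollback": "rollback",
--     "roll_back": "rollback",
--     "restart": "restart",
--     "redeploy": "restart",
--     "scale": "scale",
--     "configure": "configure",
--     "configuration": "configure",
--     "config": "configure",
--     "diagnose": "diagnose",
--     "debug": "diagnose",
--     "investigate": "diagnose",
--     "troubleshoot": "diagnose",
--     "pipeline": "pipeline",
--     "ci_cd": "pipeline",
--     "cicd": "pipeline",
--     "build": "build",
--     "test": "test",
--     "release": "release",
-- }
--
-- def extract_operation_type(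
--     user_request: str, execution_options: dict[str, Any]
-- ) -> str | None:
--     explicit_operation = normalize_operation_type(
--         execution_options.get("operation_type") or execution_options.get("operation")
--     )
--     if explicit_operation:
--         return explicit_operation
--
--     normalized_request = normalize_text(user_request)
--     first_match: tuple[int, str] | None = None
--
--     for operation_type, keywords in OPERATION_KEYWORDS.items():
--         for keyword in keywords:
--             position = normalized_request.find(keyword)
--             if position == -1:
--                 continue
--             if first_match is None or position < first_match[0]:
--                 first_match = (position, operation_type)
--
--     if first_match:
--         return first_match[1]
--
--     return None
--
-- def normalize_operation_type(value: Any) -> str | None: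
--     if not isinstance(value, str):
--         return None
--     normalized_value = value.strip().lower().replace("-", "_").replace(" ", "_")
--     if not normalized_value:
--         return None
--     return OPERATION_ALIASES.get(normalized_value)
--
-- def normalize_text(value: str) -> str:
--     return value.strip().lower()
-- ===== SOURCE B (Python) =====
-- ALIAS_PAIRS = [
--     ("deploy", "deploy"),
--     ("deployment", "deploy"),
--     ("rollback", "rollback"),
--     ("roll_back", "rollback"),
--     ("restart", "restart"),
--     ("redeploy", "restart"),
--     ("scale", "scale"),
--     ("configure", "configure"),
--     ("configuration", "configure"),
--     ("config", "configure"),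
--     ("diagnose", "diagnose"),
--     ("debug", "diagnose"),
--     ("investigate", "diagnose"),
--     ("troubleshoot", "diagnose"),
--     ("pipeline", "pipeline"),
--     ("ci_cd", "pipeline"),
--     ("cicd", "pipeline"),
--     ("build", "build"),
--     ("test", "test"),
--     ("release", "release"),
-- ]
--
-- KEYWORD_PAIRS = [
--     ("rollback", "rollback"), ("roll back", "rollback"),
--     ("deploy", "deploy"), ("rollout", "deploy"),
--     ("restart", "restart"), ("redeploy", "restart"),
--     ("scale", "scale"), ("scal", "scale"),
--     ("configure", "configure"), ("configuration", "configure"),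
--     ("config", "configure"), ("update config", "configure"),
--     ("diagnose", "diagnose"), ("debug", "diagnose"),
--     ("investigate", "diagnose"), ("troubleshoot", "diagnose"),
--     ("check", "diagnose"),
--     ("pipeline", "pipeline"), ("workflow", "pipeline"),
--     ("ci/cd", "pipeline"), ("cicd", "pipeline"),
--     ("build", "build"),
--     ("test", "test"), ("tests", "test"),
--     ("release", "release"),
-- ]
--
-- def extract_operation_type(user_request, execution_options):
--     explicit = _resolve_alias(
--         _first_option_value(execution_options, ("operation_type", "operation"))
--     )
--     if explicit:
--         return explicit
--
--     text = user_request.strip().lower()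
--     for position in range(len(text)):
--         for keyword, operation_type in KEYWORD_PAIRS:
--             if text.startswith(keyword, position):
--                 return operation_type
--     return None
--
-- def _first_option_value(options, keys):
--     value = None
--     for key in keys:
--         value = options.get(key)
--         if value:
--             return value
--     return value
--
-- def _resolve_alias(value):
--     if not isinstance(value, str):
--         return None
--     normalized = "".join("_" if c in "- " else c.lower() for c in value.strip())
--     if not normalized:
--         return None
--     for key, operation in ALIAS_PAIRS:
--         if key == normalized:
--             return operation
--     return None
-- ===== Notes on version B (the rewrite author's own statement) =====
-- stated objective: alternative
-- what changed: The per-keyword .find() minimisation with a (position, type) best-so-far tuple is replaced by flattening the keyword dict into a (keyword, operation_type) pair table and sweeping positions left to right with startswith, returning the first pair matching at the earliest position; the explicit-option path is re-decomposed into a first-truthy key scan and a one-pass per-character normalisation with a linear alias-list lookup.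
import Mathlib
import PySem

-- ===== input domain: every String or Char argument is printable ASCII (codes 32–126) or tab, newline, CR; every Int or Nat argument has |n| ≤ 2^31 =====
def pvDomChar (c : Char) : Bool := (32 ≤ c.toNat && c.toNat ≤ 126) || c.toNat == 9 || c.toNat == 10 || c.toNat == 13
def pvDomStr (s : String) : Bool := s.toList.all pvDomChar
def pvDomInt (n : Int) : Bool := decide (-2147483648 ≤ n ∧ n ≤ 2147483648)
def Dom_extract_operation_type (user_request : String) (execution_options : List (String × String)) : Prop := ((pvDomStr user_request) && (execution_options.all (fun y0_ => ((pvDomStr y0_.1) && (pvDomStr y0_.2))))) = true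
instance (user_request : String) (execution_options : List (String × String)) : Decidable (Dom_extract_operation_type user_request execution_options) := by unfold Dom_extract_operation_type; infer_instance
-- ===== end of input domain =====

-- B replaces A's per-keyword .find() minimisation by a single left-to-right position sweep over a
-- flattened keyword table, and re-decomposes the explicit-option path into a first-truthy key scan
-- plus a one-pass character normalisation with a linear alias-list lookup (objective: alternative).

-- ===== PORT A =====
def OPERATION_KEYWORDS : List (String × List String) :=
  [("rollback", ["rollback", "roll back"]),
   ("deploy", ["deploy", "rollout"]),
   ("restart", ["restart", "redeploy"]),
   ("scale", ["scale", "scal"]),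
   ("configure", ["configure", "configuration", "config", "update config"]),
   ("diagnose", ["diagnose", "debug", "investigate", "troubleshoot", "check"]),
   ("pipeline", ["pipeline", "workflow", "ci/cd", "cicd"]),
   ("build", ["build"]),
   ("test", ["test", "tests"]),
   ("release", ["release"])]

def OPERATION_ALIASES : PySem.Dict String String :=
  PySem.Dict.mk
  [("deploy", "deploy"), ("deployment", "deploy"),
   ("rollback", "rollback"), ("roll_back", "rollback"),
   ("restart", "restart"), ("redeploy", "restart"),
   ("scale", "scale"),
   ("configure", "configure"), ("configuration", "configure"), ("config", "configure"),
   ("diagnose", "diagnose"), ("debug", "diagnose"), ("investigate", "diagnose"), ("troubleshoot", "diagnose"),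
   ("pipeline", "pipeline"), ("ci_cd", "pipeline"), ("cicd", "pipeline"),
   ("build", "build"), ("test", "test"), ("release", "release")]

-- values of our dict are always strings, so `isinstance(value, str)` is `value ≠ None`
def normalize_operation_type (value : Option String) : Option String :=
  match value with
  | none => none
  | some v =>
    let normalized_value :=
      PySem.Str.replace (PySem.Str.replace (PySem.Str.lower (PySem.Str.strip v)) "-" "_") " " "_"
    if normalized_value = "" then none
    else PySem.Dict.get? OPERATION_ALIASES normalized_value

def normalize_text (value : String) : String := PySem.Str.lower (PySem.Str.strip value)

-- `d.get("operation_type") or d.get("operation")`: the first operand is falsy when missing or ""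
def pvExplicitValue (execution_options : List (String × String)) : Option String :=
  match PySem.Dict.get? (PySem.Dict.mk execution_options) "operation_type" with
  | some s => if s = "" then PySem.Dict.get? (PySem.Dict.mk execution_options) "operation" else some s
  | none => PySem.Dict.get? (PySem.Dict.mk execution_options) "operation"

def extract_operation_type (user_request : String) (execution_options : List (String × String)) : Option String :=
  let explicit_operation := normalize_operation_type (pvExplicitValue execution_options)
  if explicit_operation.getD "" ≠ "" then explicit_operation
  else
    let normalized_request := (normalize_text user_request).toList
    let first_match : Option (Int × String) :=
      OPERATION_KEYWORDS.foldl (fun fm g =>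
        g.2.foldl (fun fm keyword =>
          let position := PySem.Chars.find normalized_request keyword.toList
          if position = -1 then fm
          else match fm with
            | none => some (position, g.1)
            | some q => if position < q.1 then some (position, g.1) else some q) fm) none
    match first_match with
    | some q => some q.2
    | none => none

-- ===== PORT B =====
def pvAliasPairs : List (String × String) :=
  [("deploy", "deploy"), ("deployment", "deploy"),
   ("rollback", "rollback"), ("roll_back", "rollback"),
   ("restart", "restart"), ("redeploy", "restart"),
   ("scale", "scale"),
   ("configure", "configure"), ("configuration", "configure"), ("config", "configure"),
   ("diagnose", "diagnose"), ("debug", "diagnose"), ("investigate", "diagnose"), ("troubleshoot", "diagnose"),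
   ("pipeline", "pipeline"), ("ci_cd", "pipeline"), ("cicd", "pipeline"),
   ("build", "build"), ("test", "test"), ("release", "release")]

def pvKeywordPairs : List (String × String) :=
  [("rollback", "rollback"), ("roll back", "rollback"),
   ("deploy", "deploy"), ("rollout", "deploy"),
   ("restart", "restart"), ("redeploy", "restart"),
   ("scale", "scale"), ("scal", "scale"),
   ("configure", "configure"), ("configuration", "configure"),
   ("config", "configure"), ("update config", "configure"),
   ("diagnose", "diagnose"), ("debug", "diagnose"),
   ("investigate", "diagnose"), ("troubleshoot", "diagnose"),
   ("check", "diagnose"),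
   ("pipeline", "pipeline"), ("workflow", "pipeline"),
   ("ci/cd", "pipeline"), ("cicd", "pipeline"),
   ("build", "build"),
   ("test", "test"), ("tests", "test"),
   ("release", "release")]

-- Source B `_first_option_value`: returns the first truthy `options.get(key)`, else the last value read
def pvFirstOptionValue (options : List (String × String)) : List String → Option String
  | [] => none
  | [key] => (options.find? (fun p => p.1 == key)).map (fun p => p.2)
  | key :: rest =>
    let value := (options.find? (fun p => p.1 == key)).map (fun p => p.2)
    if value.getD "" ≠ "" then value else pvFirstOptionValue options rest

-- Source B `_resolve_alias`: one-pass char normalisation, then a linear scan of the alias pairs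
def pvResolveAlias (value : Option String) : Option String :=
  match value with
  | none => none
  | some v =>
    let normalized := (PySem.Chars.strip v.toList).map
      (fun c => if c = '-' ∨ c = ' ' then '_' else PySem.Chars.lowerChar c)
    if normalized = [] then none
    else pvAliasPairs.findSome? (fun p => if p.1.toList = normalized then some p.2 else none)

def extract_operation_type_alt (user_request : String) (execution_options : List (String × String)) : Option String :=
  let explicit := pvResolveAlias
    (pvFirstOptionValue execution_options ["operation_type", "operation"])
  if explicit.getD "" ≠ "" then explicit
  else
    let text := PySem.Chars.lower (PySem.Chars.strip user_request.toList)
    -- `text.startswith(keyword, position)` for 0 ≤ position < len is exactly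
    -- `keyword` being a prefix of the drop at `position`
    (List.range text.length).findSome? (fun position =>
      pvKeywordPairs.findSome? (fun q =>
        if PySem.Chars.startswith (text.drop position) q.1.toList then some q.2 else none))

-- ===== PRECONDITION & SPEC =====
def Spec_extract_operation_type (user_request : String) (execution_options : List (String × String)) (out : Option String) : Prop := out = extract_operation_type_alt user_request execution_options
instance (user_request : String) (execution_options : List (String × String)) (out : Option String) : Decidable (Spec_extract_operation_type user_request execution_options out) := by unfold Spec_extract_operation_type; infer_instance

-- ===== CLAIM (what is proved, stated in full; the proofs are below) =====
def Claim_equal_extract_operation_type : Prop := ∀ (user_request : String) (execution_options : List (String × String)), Dom_extract_operation_type user_request execution_options → Spec_extract_operation_type user_request execution_options (extract_operation_type user_request execution_options)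

-- ===== LEMMAS AND PROOFS =====

-- replacing a single character by a single character is a pointwise map
theorem pv_replace_go_single (a b : Char) (l acc : List Char) (fuel : Nat) (h : l.length ≤ fuel) :
    PySem.Chars.replace.go [a] [b] fuel l acc =
      acc.reverse ++ l.map (fun c => if c = a then b else c) := by
  induction l generalizing fuel acc with
  | nil => cases fuel <;> simp [PySem.Chars.replace.go]
  | cons c t ih =>
    cases fuel with
    | zero => simp at h
    | succ m =>
      rw [PySem.Chars.replace.go]
      by_cases hc : c = a
      · subst hc
        simp only [List.isPrefixOf, beq_self_eq_true, Bool.true_and, if_true,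
          List.length_cons, List.length_nil, List.drop_succ_cons, List.drop_zero]
        rw [ih ([b].reverse ++ acc) m (by simp at h; omega)]
        simp
      · have hpre : ([a].isPrefixOf (c :: t)) = false := by
          simp [List.isPrefixOf]; exact fun h' => (hc h'.symm).elim
        rw [if_neg (by simp [hpre])]
        rw [ih (c :: acc) m (by simp at h; omega)]
        simp [hc]

theorem pv_replace_single (a b : Char) (s : List Char) :
    PySem.Chars.replace s [a] [b] = s.map (fun c => if c = a then b else c) := by
  rw [PySem.Chars.replace]
  simp [pv_replace_go_single a b s [] s.length (le_refl _)]

-- the composite lower-then-substitute of A equals B's one-pass character map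
theorem pv_charmap (c : Char) :
    (if (if PySem.Chars.lowerChar c = '-' then '_' else PySem.Chars.lowerChar c) = ' ' then '_'
     else (if PySem.Chars.lowerChar c = '-' then '_' else PySem.Chars.lowerChar c)) =
    (if c = '-' ∨ c = ' ' then '_' else PySem.Chars.lowerChar c) := by
  by_cases h1 : c = '-'
  · subst h1; decide
  · by_cases h2 : c = ' '
    · subst h2; decide
    · have hne : PySem.Chars.lowerChar c ≠ '-' ∧ PySem.Chars.lowerChar c ≠ ' ' := by
        unfold PySem.Chars.lowerChar
        by_cases hu : PySem.Chars.isupper c = true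
        · rw [if_pos hu]
          have hb : 65 ≤ c.toNat ∧ c.toNat ≤ 90 := by
            simp only [PySem.Chars.isupper, Bool.and_eq_true, decide_eq_true_eq, Char.le_def] at hu
            exact ⟨hu.1, hu.2⟩
          have hv : (c.toNat + 32).isValidChar := by left; omega
          have ht : (Char.ofNat (c.toNat + 32)).toNat = c.toNat + 32 := by
            rw [Char.toNat_ofNat, if_pos hv]
          constructor <;> intro heq <;> rw [heq] at ht
          · have h45 : ('-').toNat = 45 := by decide
            omega
          · have h32 : (' ').toNat = 32 := by decide
            omega
        · rw [if_neg hu]; exact ⟨h1, h2⟩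
      simp [hne.1, hne.2, h1, h2]

theorem pv_norm_eq (v : String) :
    (PySem.Str.replace (PySem.Str.replace (PySem.Str.lower (PySem.Str.strip v)) "-" "_") " " "_").toList =
    (PySem.Chars.strip v.toList).map
      (fun c => if c = '-' ∨ c = ' ' then '_' else PySem.Chars.lowerChar c) := by
  have h1 : ("-" : String).toList = ['-'] := rfl
  have h2 : ("_" : String).toList = ['_'] := rfl
  have h3 : (" " : String).toList = [' '] := rfl
  simp only [PySem.Str.toList_replace, PySem.Str.toList_lower, PySem.Str.toList_strip,
    h1, h2, h3, pv_replace_single, PySem.Chars.lower, List.map_map]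
  apply List.map_congr_left
  intro c _
  exact pv_charmap c

-- String.toList is injective
theorem pv_toList_inj (s t : String) (h : s.toList = t.toList) : s = t := by
  have h2 := congrArg String.ofList h
  rwa [String.ofList_toList, String.ofList_toList] at h2

-- Dict.get? on the alias dict IS the first-match scan of the flat alias pair list
theorem pv_get_aliases (n : String) :
    PySem.Dict.get? OPERATION_ALIASES n =
    (pvAliasPairs.find? (fun p => p.1 == n)).map (fun p => p.2) := rfl

-- a guarded findSome? over string-keyed pairs is the first-match lookup
theorem pv_findSome_eq_find (L : List (String × String)) (n : String) :
    L.findSome? (fun p => if p.1.toList = n.toList then some p.2 else none) =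
    (L.find? (fun p => p.1 == n)).map (fun p => p.2) := by
  induction L with
  | nil => rfl
  | cons p t ih =>
    by_cases h : p.1 = n
    · simp [h]
    · have hl : p.1.toList ≠ n.toList := fun hc => h (pv_toList_inj _ _ hc)
      simp [h, hl, ih]

-- the two explicit-option paths agree
theorem pv_alias_eq (v : Option String) :
    normalize_operation_type v = pvResolveAlias v := by
  cases v with
  | none => rfl
  | some s =>
    simp only [normalize_operation_type, pvResolveAlias]
    rw [pv_get_aliases, ← pv_findSome_eq_find, ← pv_norm_eq]
    by_cases he : (PySem.Str.replace (PySem.Str.replace (PySem.Str.lower (PySem.Str.strip s)) "-" "_") " " "_") = ""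
    · rw [if_pos he, if_pos (by rw [he]; rfl)]
    · rw [if_neg he, if_neg (fun hc => he (pv_toList_inj _ _ (by rw [hc]; rfl)))]

theorem pv_value_eq (execution_options : List (String × String)) :
    pvExplicitValue execution_options =
    pvFirstOptionValue execution_options ["operation_type", "operation"] := by
  simp only [pvExplicitValue, pvFirstOptionValue]
  have hop : ∀ k : String, PySem.Dict.get? (PySem.Dict.mk execution_options) k =
      (execution_options.find? (fun p => p.1 == k)).map (fun p => p.2) := fun _ => rfl
  rw [hop, hop]
  cases hf : (execution_options.find? (fun p => p.1 == "operation_type")).map (fun p => p.2) with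
  | none => simp
  | some s =>
    by_cases hs : s = ""
    · simp [hs]
    · simp [hs]

theorem pv_explicit_eq (execution_options : List (String × String)) :
    normalize_operation_type (pvExplicitValue execution_options) =
    pvResolveAlias (pvFirstOptionValue execution_options ["operation_type", "operation"]) := by
  rw [pv_alias_eq, pv_value_eq]

-- ===== the keyword-scan equivalence =====

-- A's loop body on one flattened (keyword, operation_type) pair
def pvStep (nr : List Char) (fm : Option (Int × String)) (q : String × String) : Option (Int × String) :=
  let position := PySem.Chars.find nr q.1.toList
  if position = -1 then fm
  else match fm with
    | none => some (position, q.2)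
    | some m => if position < m.1 then some (position, q.2) else some m

def pvComb (a b : Option (Int × String)) : Option (Int × String) :=
  match a, b with
  | none, b => b
  | some m, none => some m
  | some m, some m' => if m'.1 < m.1 then some m' else some m

theorem pvStep_comb (nr : List Char) (a X : Option (Int × String)) (q : String × String) :
    pvComb (pvStep nr a q) X = pvComb a (pvComb (pvStep nr none q) X) := by
  simp only [pvStep]
  by_cases h1 : PySem.Chars.find nr q.1.toList = -1
  · rw [if_pos h1, if_pos h1]
    cases a <;> cases X <;> rfl
  · rw [if_neg h1, if_neg h1]
    cases a with
    | none => rfl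
    | some m =>
      cases X with
      | none =>
        by_cases h2 : PySem.Chars.find nr q.1.toList < m.1 <;> simp [pvComb, h2]
      | some x =>
        by_cases h2 : PySem.Chars.find nr q.1.toList < m.1 <;>
          by_cases h3 : x.1 < PySem.Chars.find nr q.1.toList <;>
          by_cases h4 : x.1 < m.1 <;>
          simp [pvComb, h2, h3, h4] <;> omega

theorem pvFoldl_comb (nr : List Char) (kws : List (String × String)) (a : Option (Int × String)) :
    kws.foldl (pvStep nr) a = pvComb a (kws.foldl (pvStep nr) none) := by
  induction kws generalizing a with
  | nil => cases a <;> rfl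
  | cons q t ih =>
    simp only [List.foldl_cons]
    rw [ih (pvStep nr a q), ih (pvStep nr none q), pvStep_comb]

def pvM (nr : List Char) (kws : List (String × String)) : Option (Int × String) :=
  kws.foldl (pvStep nr) none

theorem pvM_cons (nr : List Char) (q : String × String) (t : List (String × String)) :
    pvM nr (q :: t) = pvComb (pvStep nr none q) (pvM nr t) := by
  simp only [pvM, List.foldl_cons]
  exact pvFoldl_comb nr t (pvStep nr none q)

theorem pvM_none_iff (nr : List Char) (kws : List (String × String)) :
    pvM nr kws = none ↔ ∀ x ∈ kws, PySem.Chars.find nr x.1.toList = -1 := by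
  induction kws with
  | nil => simp [pvM]
  | cons q t ih =>
    rw [pvM_cons]
    by_cases h : PySem.Chars.find nr q.1.toList = -1
    · simp only [pvStep, h, pvComb]
      simp [ih, h]
    · simp only [pvStep, h]
      constructor
      · intro hc; cases hM : pvM nr t <;> rw [hM] at hc <;> simp [pvComb] at hc
        split at hc <;> simp at hc
      · intro hall; exact absurd (hall q (by simp)) h

theorem pvM_some (nr : List Char) (kws : List (String × String)) (p : Int) (op : String)
    (h : pvM nr kws = some (p, op)) :
    p ≠ -1 ∧ (∀ x ∈ kws, PySem.Chars.find nr x.1.toList = -1 ∨ p ≤ PySem.Chars.find nr x.1.toList) ∧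
    ∃ l kw r, kws = l ++ (kw, op) :: r ∧ PySem.Chars.find nr kw.toList = p ∧
      ∀ x ∈ l, PySem.Chars.find nr x.1.toList = -1 ∨ p < PySem.Chars.find nr x.1.toList := by
  induction kws generalizing p op with
  | nil => simp [pvM] at h
  | cons q t ih =>
    rw [pvM_cons] at h
    by_cases hq : PySem.Chars.find nr q.1.toList = -1
    · simp only [pvStep, hq, pvComb] at h
      obtain ⟨h1, h2, l, kw, r, hdec, hfind, hl⟩ := ih p op h
      refine ⟨h1, ?_, q :: l, kw, r, by simp [hdec], hfind, ?_⟩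
      · intro x hx; rcases List.mem_cons.mp hx with rfl | hx
        · left; exact hq
        · exact h2 x hx
      · intro x hx; rcases List.mem_cons.mp hx with rfl | hx
        · left; exact hq
        · exact hl x hx
    · simp only [pvStep, if_neg hq] at h
      cases hM : pvM nr t with
      | none =>
        rw [hM] at h; simp only [pvComb] at h
        obtain ⟨hp, hop⟩ : PySem.Chars.find nr q.1.toList = p ∧ q.2 = op := by
          constructor <;> { injection h with h'; cases h'; rfl }
        have hall := (pvM_none_iff nr t).mp hM
        refine ⟨hp ▸ hq, ?_, [], q.1, t, by simp [← hop], hp, by simp⟩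
        intro x hx; rcases List.mem_cons.mp hx with rfl | hx
        · right; omega
        · left; exact hall x hx
      | some m =>
        obtain ⟨p', op'⟩ := m
        rw [hM] at h; simp only [pvComb] at h
        obtain ⟨h1', h2', l', kw', r', hdec', hfind', hl'⟩ := ih p' op' hM
        by_cases hlt : p' < PySem.Chars.find nr q.1.toList
        · rw [if_pos hlt] at h
          obtain ⟨hp, hop⟩ : p' = p ∧ op' = op := by
            constructor <;> { injection h with h'; cases h'; rfl }
          subst hp; subst hop
          refine ⟨h1', ?_, q :: l', kw', r', by simp [hdec'], hfind', ?_⟩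
          · intro x hx; rcases List.mem_cons.mp hx with rfl | hx
            · right; omega
            · exact h2' x hx
          · intro x hx; rcases List.mem_cons.mp hx with rfl | hx
            · right; omega
            · exact hl' x hx
        · rw [if_neg hlt] at h
          obtain ⟨hp, hop⟩ : PySem.Chars.find nr q.1.toList = p ∧ q.2 = op := by
            constructor <;> { injection h with h'; cases h'; rfl }
          refine ⟨hp ▸ hq, ?_, [], q.1, t, by simp [← hop], hp, by simp⟩
          intro x hx; rcases List.mem_cons.mp hx with rfl | hx
          · right; omega
          · rcases h2' x hx with h' | h'
            · left; exact h'
            · right; omega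

-- keyword matches at position j → A's find lands at or before j
theorem pv_prefix_find_le (nr kw : List Char) (j : Nat) (h : kw <+: nr.drop j) :
    PySem.Chars.find nr kw ≠ -1 ∧ PySem.Chars.find nr kw ≤ (j : Int) := by
  have hin : PySem.Chars.isIn kw nr = true :=
    (PySem.Chars.exists_prefix_drop_iff_isIn kw nr).mp ⟨j, h⟩
  have hne : PySem.Chars.find nr kw ≠ -1 :=
    (PySem.Chars.find_ne_neg_one_iff nr kw).mpr ((PySem.Chars.isIn_iff_infix kw nr).mp hin)
  have hnn : 0 ≤ PySem.Chars.find nr kw := by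
    have := PySem.Chars.neg_one_le_find nr kw; omega
  refine ⟨hne, ?_⟩
  by_contra hc
  exact (PySem.Chars.find_spec hnn).2 j (by omega) h

theorem pvKeywordPairs_key_ne_nil : ∀ x ∈ pvKeywordPairs, x.1.toList ≠ [] := by decide

theorem pv_findSome?_range_eq_some {α : Type} (f : Nat → Option α) (k n : Nat) (v : α)
    (hk : k < n) (hv : f k = some v) (hnone : ∀ i < k, f i = none) :
    (List.range n).findSome? f = some v := by
  induction n with
  | zero => omega
  | succ m ih =>
    rw [List.range_succ, List.findSome?_append]
    by_cases h : k < m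
    · rw [ih h]; rfl
    · have hkm : k = m := by omega
      subst hkm
      have : (List.range k).findSome? f = none := by
        rw [List.findSome?_eq_none_iff]
        intro i hi
        exact hnone i (by simp at hi; omega)
      rw [this]
      simp [List.findSome?, hv]

-- the core equivalence of the two keyword scans, for an arbitrary normalized request
theorem pv_scan_eq (nr : List Char) :
    (match pvM nr pvKeywordPairs with
     | some q => some q.2
     | none => (none : Option String)) =
    (List.range nr.length).findSome? (fun position =>
      pvKeywordPairs.findSome? (fun q =>
        if PySem.Chars.startswith (nr.drop position) q.1.toList then some q.2 else none)) := by
  cases hM : pvM nr pvKeywordPairs with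
  | none =>
    have hall := (pvM_none_iff nr pvKeywordPairs).mp hM
    show (none : Option String) = _
    symm
    rw [List.findSome?_eq_none_iff]
    intro p _
    rw [List.findSome?_eq_none_iff]
    intro x hx
    rw [if_neg]
    intro hsw
    have hpre := (PySem.Chars.startswith_iff _ _).mp hsw
    exact (pv_prefix_find_le nr x.1.toList p hpre).1 (hall x hx)
  | some m =>
    obtain ⟨p, op⟩ := m
    obtain ⟨hne, hall, l, kw, r, hdec, hfind, hl⟩ := pvM_some nr pvKeywordPairs p op hM
    have hp0 : 0 ≤ p := by have := PySem.Chars.neg_one_le_find nr kw.toList; rw [hfind] at this; omega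
    have hkw_mem : (kw, op) ∈ pvKeywordPairs := by rw [hdec]; simp
    have hkw_ne : kw.toList ≠ [] := pvKeywordPairs_key_ne_nil (kw, op) hkw_mem
    have hpre : kw.toList <+: nr.drop p.toNat := by
      have := (PySem.Chars.find_spec (s := nr) (sub := kw.toList) (by omega)).1
      rwa [hfind] at this
    have hlt : p.toNat < nr.length := by
      by_contra hc
      rw [List.drop_eq_nil_iff.mpr (by omega)] at hpre
      exact hkw_ne (List.prefix_nil.mp hpre)
    symm
    apply pv_findSome?_range_eq_some _ p.toNat _ op hlt
    · -- at position p.toNat the first matching pair in order is (kw, op)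
      rw [hdec, List.findSome?_append]
      have hlnone : l.findSome? (fun q =>
          if PySem.Chars.startswith (nr.drop p.toNat) q.1.toList then some q.2 else none) = none := by
        rw [List.findSome?_eq_none_iff]
        intro x hx
        rw [if_neg]
        intro hsw
        have hpre' := (PySem.Chars.startswith_iff _ _).mp hsw
        have hle := pv_prefix_find_le nr x.1.toList p.toNat hpre'
        rcases hl x hx with h' | h'
        · exact hle.1 h'
        · have : (p.toNat : Int) = p := by omega
          omega
      rw [hlnone]
      simp only [List.findSome?_cons, (PySem.Chars.startswith_iff _ _).mpr hpre, Option.none_or]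
      rfl
    · -- no keyword matches at any earlier position
      intro i hi
      rw [List.findSome?_eq_none_iff]
      intro x hx
      rw [if_neg]
      intro hsw
      have hpre' := (PySem.Chars.startswith_iff _ _).mp hsw
      have hle := pv_prefix_find_le nr x.1.toList i hpre'
      rcases hall x hx with h' | h'
      · exact hle.1 h'
      · omega

-- A's nested fold over the grouped keyword dict is the flat fold over B's flattened pair table
theorem pv_nested_fold_eq (nr : List Char) :
    OPERATION_KEYWORDS.foldl (fun fm g =>
      g.2.foldl (fun fm keyword =>
        let position := PySem.Chars.find nr keyword.toList
        if position = -1 then fm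
        else match fm with
          | none => some (position, g.1)
          | some q => if position < q.1 then some (position, g.1) else some q) fm) none =
    pvM nr pvKeywordPairs := by
  have hflat : pvKeywordPairs =
      OPERATION_KEYWORDS.flatMap (fun g => g.2.map (fun kw => (kw, g.1))) := by rfl
  rw [hflat]
  simp only [pvM, List.foldl_flatMap, List.foldl_map, pvStep]

-- ===== VERDICT (by name: the statement is the Claim_ definition above) =====
theorem extract_operation_type_spec : Claim_equal_extract_operation_type := by
  intro user_request execution_options _
  show extract_operation_type _ _ = _
  rw [extract_operation_type, extract_operation_type_alt]
  rw [← pv_explicit_eq]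
  by_cases h : (normalize_operation_type (pvExplicitValue execution_options)).getD "" ≠ ""
  · rw [if_pos h, if_pos h]
  · rw [if_neg h, if_neg h]
    have htext : (normalize_text user_request).toList =
        PySem.Chars.lower (PySem.Chars.strip user_request.toList) := by
      simp [normalize_text]
    simp only [htext, pv_nested_fold_eq]
    exact pv_scan_eq (PySem.Chars.lower (PySem.Chars.strip user_request.toList))
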